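-- pv_equiv track=rewrite | github.com/algowizzzz/RAG_Agent | response /refine_synthesis_tool.py | prioritize_chunks
-- ===== SOURCE A (Python) =====
-- from typing import List, Dict, Any, Optional, Tuple
--
-- def prioritize_chunks(chunks: List[str], user_query: str) -> List[str]:
--     """Order chunks by relevance to user query for optimal refine processing."""
--     query_keywords = set(user_query.lower().split())
--     scored_chunks = []
--
--     for chunk in chunks:
--         chunk_words = set(chunk.lower().split())
--         relevance_score = len(query_keywords.intersection(chunk_words))
--         scored_chunks.append((chunk, relevance_score))
--
--     # Sort by relevance (highest first) for better initial foundation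
--     return [chunk for chunk, _ in sorted(scored_chunks, key=lambda x: x[1], reverse=True)]
-- ===== SOURCE B (Python) =====
-- def prioritize_chunks(chunks, user_query):
--     """Order chunks by relevance to user query via score buckets (bucket sort)."""
--     query_keywords = set(user_query.lower().split())
--     buckets = {}
--     for chunk in chunks:
--         score = len(query_keywords & set(chunk.lower().split()))
--         buckets.setdefault(score, []).append(chunk)
--     result = []
--     for score in sorted(buckets, reverse=True):
--         result.extend(buckets[score])
--     return result
-- ===== Notes on version B (the rewrite author's own statement) =====
-- stated objective: alternative
-- what changed: Replaces the comparison sort of (chunk, score) pairs by a stable bucket sort: chunks are grouped into a dict keyed by score in original order, then emitted by iterating the distinct scores in descending order.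
import Mathlib
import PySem

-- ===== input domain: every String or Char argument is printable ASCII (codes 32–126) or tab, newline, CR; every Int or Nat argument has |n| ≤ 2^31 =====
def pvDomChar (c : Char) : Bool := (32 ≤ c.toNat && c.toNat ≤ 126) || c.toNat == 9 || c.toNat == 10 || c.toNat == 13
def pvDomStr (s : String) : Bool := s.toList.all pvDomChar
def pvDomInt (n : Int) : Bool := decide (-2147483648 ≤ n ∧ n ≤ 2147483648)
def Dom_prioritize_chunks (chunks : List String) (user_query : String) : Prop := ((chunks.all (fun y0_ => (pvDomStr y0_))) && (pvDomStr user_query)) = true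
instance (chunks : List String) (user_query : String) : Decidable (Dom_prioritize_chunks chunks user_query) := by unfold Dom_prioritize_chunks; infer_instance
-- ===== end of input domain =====

-- B replaces A's reverse-sorted comparison sort of (chunk, score) pairs by a stable
-- bucket sort: chunks are grouped into a dict keyed by score, emitted by descending score.

-- score of one chunk = len(query_keywords & set(chunk.lower().split())) (shared by both Pythons verbatim)
def pvScore (qk : PySem.Set String) (chunk : String) : Int :=
  PySem.Set.len (PySem.Set.inter qk (PySem.Set.ofList (PySem.Str.split₀ (PySem.Str.lower chunk))))

-- ===== PORT A =====
def prioritize_chunks (chunks : List String) (user_query : String) : List String :=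
  let query_keywords : PySem.Set String := PySem.Set.ofList (PySem.Str.split₀ (PySem.Str.lower user_query))
  let scored_chunks : List (String × Int) :=
    chunks.foldl (fun acc chunk => acc ++ [(chunk, pvScore query_keywords chunk)]) []
  (PySem.List.sorted scored_chunks (fun x => x.2) true).map (fun x => x.1)

-- ===== PORT B =====
def prioritize_chunks_alt (chunks : List String) (user_query : String) : List String :=
  let query_keywords : PySem.Set String := PySem.Set.ofList (PySem.Str.split₀ (PySem.Str.lower user_query))
  let buckets : PySem.Dict Int (List String) :=
    chunks.foldl (fun d chunk => d.modify (pvScore query_keywords chunk) [] (fun l => l ++ [chunk])) PySem.Dict.empty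
  (PySem.List.sorted buckets.keys (fun s => s) true).foldl (fun res s => res ++ buckets.getD s []) []

-- ===== PRECONDITION & SPEC =====
def Spec_prioritize_chunks (chunks : List String) (user_query : String) (out : List String) : Prop := out = prioritize_chunks_alt chunks user_query
instance (chunks : List String) (user_query : String) (out : List String) : Decidable (Spec_prioritize_chunks chunks user_query out) := by unfold Spec_prioritize_chunks; infer_instance

-- ===== CLAIM (what is proved, stated in full; the proofs are below) =====
def Claim_equal_prioritize_chunks : Prop := ∀ (chunks : List String) (user_query : String), Dom_prioritize_chunks chunks user_query → Spec_prioritize_chunks chunks user_query (prioritize_chunks chunks user_query)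

-- ===== LEMMAS AND PROOFS =====

-- A's accumulation loop builds the map of (chunk, score) pairs.
theorem foldl_append_pair_eq_map (key : String → Int) (chunks : List String) (acc : List (String × Int)) :
    chunks.foldl (fun acc c => acc ++ [(c, key c)]) acc = acc ++ chunks.map (fun c => (c, key c)) := by
  induction chunks generalizing acc with
  | nil => simp
  | cons c t ih => simp [List.foldl_cons, ih, List.append_assoc]

-- insertBy for the descending order preserves descending pairwise.
theorem insertBy_desc_pairwise {α : Type} (key : α → Int) (x : α) :
    ∀ (acc : List α), acc.Pairwise (fun a b => key b ≤ key a) →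
      (PySem.List.insertBy (fun a b => decide (key b < key a)) x acc).Pairwise (fun a b => key b ≤ key a) := by
  intro acc
  induction acc with
  | nil => intro _; simp [PySem.List.insertBy]
  | cons y t ih =>
    intro hp
    rw [List.pairwise_cons] at hp
    obtain ⟨hy, ht⟩ := hp
    by_cases h : key y < key x
    · have hins : PySem.List.insertBy (fun a b => decide (key b < key a)) x (y :: t) = x :: y :: t := by
        simp [PySem.List.insertBy, h]
      rw [hins]
      refine List.Pairwise.cons ?_ (List.Pairwise.cons hy ht)
      intro z hz
      rcases List.mem_cons.mp hz with rfl | hz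
      · omega
      · have := hy z hz; omega
    · have hins : PySem.List.insertBy (fun a b => decide (key b < key a)) x (y :: t) =
          y :: PySem.List.insertBy (fun a b => decide (key b < key a)) x t := by
        simp [PySem.List.insertBy, h]
      rw [hins]
      refine List.Pairwise.cons ?_ (ih ht)
      intro z hz
      rcases (PySem.List.mem_insertBy _ _ _ _).mp hz with rfl | hz
      · omega
      · exact hy z hz
  
-- stability of one insertion: inserted element lands after its equal-key class.
theorem filter_insertBy_desc {α : Type} (key : α → Int) (x : α) (k : Int) :
    ∀ (acc : List α), acc.Pairwise (fun a b => key b ≤ key a) →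
      (PySem.List.insertBy (fun a b => decide (key b < key a)) x acc).filter (fun y => key y == k) =
        if key x == k then acc.filter (fun y => key y == k) ++ [x]
        else acc.filter (fun y => key y == k) := by
  intro acc
  induction acc with
  | nil =>
    intro _
    simp only [PySem.List.insertBy]
    by_cases h : key x == k <;> simp [h, List.filter]
  | cons y t ih =>
    intro hp
    rw [List.pairwise_cons] at hp
    obtain ⟨hy, ht⟩ := hp
    by_cases h : key y < key x
    · have hins : PySem.List.insertBy (fun a b => decide (key b < key a)) x (y :: t) = x :: y :: t := by
        simp [PySem.List.insertBy, h]
      rw [hins, List.filter_cons]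
      by_cases hx : key x == k
      · have hk : key x = k := beq_iff_eq.mp hx
        have hnil : (y :: t).filter (fun y => key y == k) = [] := by
          rw [List.filter_eq_nil_iff]
          intro a ha
          rcases List.mem_cons.mp ha with rfl | ha
          · simp only [beq_iff_eq]; omega
          · have := hy a ha; simp only [beq_iff_eq]; omega
        rw [hnil]
        simp [hx]
      · simp [hx]
    · have hins : PySem.List.insertBy (fun a b => decide (key b < key a)) x (y :: t) =
          y :: PySem.List.insertBy (fun a b => decide (key b < key a)) x t := by
        simp [PySem.List.insertBy, h]
      rw [hins, List.filter_cons, ih ht]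
      by_cases hyk : key y == k <;> by_cases hx : key x == k <;>
        simp [hyk, hx]
  
-- stability of the whole insertion sort loop.
theorem filter_foldl_insertBy_desc {α : Type} (key : α → Int) (k : Int) :
    ∀ (xs acc : List α), acc.Pairwise (fun a b => key b ≤ key a) →
      (xs.foldl (fun acc x => PySem.List.insertBy (fun a b => decide (key b < key a)) x acc) acc).filter (fun y => key y == k) =
        acc.filter (fun y => key y == k) ++ xs.filter (fun y => key y == k) := by
  intro xs
  induction xs with
  | nil => intro acc _; simp
  | cons x t ih =>
    intro acc hp
    rw [List.foldl_cons, ih _ (insertBy_desc_pairwise key x acc hp), filter_insertBy_desc key x k acc hp]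
    by_cases hx : key x == k <;> simp [hx]

-- stability of PySem's reverse sort: per-key classes are untouched.
theorem filter_sorted_rev {α : Type} (key : α → Int) (xs : List α) (k : Int) :
    (PySem.List.sorted xs key true).filter (fun y => key y == k) = xs.filter (fun y => key y == k) := by
  rw [PySem.List.sorted_rev_eq_foldl_insertBy]
  simpa using filter_foldl_insertBy_desc key k xs [] (by simp)

-- a descending stable order is uniquely determined by its per-key classes.
theorem eq_of_desc_of_filters_eq {α : Type} (key : α → Int) :
    ∀ (l1 l2 : List α), l1.Pairwise (fun a b => key b ≤ key a) → l2.Pairwise (fun a b => key b ≤ key a) →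
      (∀ k : Int, l1.filter (fun x => key x == k) = l2.filter (fun x => key x == k)) → l1 = l2 := by
  intro l1
  induction l1 with
  | nil =>
    intro l2 _ _ hf
    cases l2 with
    | nil => rfl
    | cons b t2 =>
      have := hf (key b)
      rw [List.filter_nil, List.filter_cons_of_pos (by simp)] at this
      exact absurd this (by simp)
  | cons a t1 ih =>
    intro l2 h1 h2 hf
    cases l2 with
    | nil =>
      have := hf (key a)
      rw [List.filter_nil, List.filter_cons_of_pos (by simp)] at this
      exact absurd this (by simp)
    | cons b t2 =>
      rw [List.pairwise_cons] at h1 h2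
      obtain ⟨ha, ht1⟩ := h1
      obtain ⟨hb, ht2⟩ := h2
      have hba : key b ≤ key a := by
        have hmem : b ∈ List.filter (fun x => key x == key b) (a :: t1) := by
          rw [hf (key b)]
          exact List.mem_filter.mpr ⟨List.mem_cons_self, by simp⟩
        rcases List.mem_cons.mp (List.mem_filter.mp hmem).1 with rfl | hx
        · exact le_refl _
        · exact ha b hx
      have hab : key a ≤ key b := by
        have hmem : a ∈ List.filter (fun x => key x == key a) (b :: t2) := by
          rw [← hf (key a)]
          exact List.mem_filter.mpr ⟨List.mem_cons_self, by simp⟩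
        rcases List.mem_cons.mp (List.mem_filter.mp hmem).1 with rfl | hx
        · exact le_refl _
        · exact hb a hx
      have hkeq : key a = key b := le_antisymm hab hba
      have h := hf (key a)
      rw [List.filter_cons_of_pos (by simp), List.filter_cons_of_pos (by simp [hkeq])] at h
      obtain ⟨rfl, hta⟩ := by exact List.cons.inj h
      congr 1
      apply ih t2 ht1 ht2
      intro k
      by_cases hk : key a == k
      · have : key a = k := beq_iff_eq.mp hk
        rw [← this]; exact hta
      · have h := hf k
        rwa [List.filter_cons_of_neg (by simpa using hk), List.filter_cons_of_neg (by simpa using hk)] at h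

-- concatenating key classes along a strictly descending key list is descending.
theorem flatMap_filter_pairwise {α : Type} (key : α → Int) (xs : List α) :
    ∀ (K : List Int), K.Pairwise (· > ·) →
      (K.flatMap (fun s => xs.filter (fun x => key x == s))).Pairwise (fun a b => key b ≤ key a) := by
  intro K
  induction K with
  | nil => intro _; simp
  | cons s K' ih =>
    intro hp
    rw [List.pairwise_cons] at hp
    obtain ⟨hs, hK'⟩ := hp
    rw [List.flatMap_cons, List.pairwise_append]
    refine ⟨?_, ih hK', ?_⟩
    · apply List.pairwise_of_forall_mem_list
      intro a haa b hbb
      have h1 : key a = s := by simpa using (List.mem_filter.mp haa).2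
      have h2 : key b = s := by simpa using (List.mem_filter.mp hbb).2
      omega
    · intro a haa b hbb
      have h1 : key a = s := by simpa using (List.mem_filter.mp haa).2
      obtain ⟨s', hs', hbb⟩ := List.mem_flatMap.mp hbb
      have h2 : key b = s' := by simpa using (List.mem_filter.mp hbb).2
      have := hs s' hs'
      omega

-- per-key classes of the concatenation.
theorem filter_flatMap_filter {α : Type} (key : α → Int) (xs : List α) (k : Int) :
    ∀ (K : List Int), K.Pairwise (· > ·) →
      (K.flatMap (fun s => xs.filter (fun x => key x == s))).filter (fun x => key x == k) =
        if k ∈ K then xs.filter (fun x => key x == k) else [] := by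
  intro K
  induction K with
  | nil => intro _; simp
  | cons s K' ih =>
    intro hp
    rw [List.pairwise_cons] at hp
    obtain ⟨hs, hK'⟩ := hp
    rw [List.flatMap_cons, List.filter_append, List.filter_filter, ih hK']
    by_cases hks : k = s
    · subst hks
      have hnot : k ∉ K' := fun h => absurd (hs k h) (lt_irrefl k)
      rw [if_neg hnot, if_pos List.mem_cons_self, List.append_nil]
      exact List.filter_congr (fun x _ => by by_cases h : key x == k <;> simp [h])
    · have hnil : ∀ x ∈ xs, ¬((key x == k) && (key x == s)) = true := by
        intro x _
        simp only [Bool.and_eq_true, beq_iff_eq]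
        omega
      rw [List.filter_eq_nil_iff.mpr hnil, List.nil_append]
      simp [List.mem_cons, hks]

-- the central fact: PySem's stable reverse sort = concatenation of key classes
-- along any strictly descending key list covering all keys.
theorem sorted_rev_eq_flatMap {α : Type} (key : α → Int) (xs : List α) (K : List Int)
    (hK : K.Pairwise (· > ·)) (hcov : ∀ x ∈ xs, key x ∈ K) :
    PySem.List.sorted xs key true = K.flatMap (fun s => xs.filter (fun x => key x == s)) := by
  apply eq_of_desc_of_filters_eq key
  · exact PySem.List.sorted_pairwise_rev xs key
  · exact flatMap_filter_pairwise key xs K hK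
  · intro k
    rw [filter_sorted_rev, filter_flatMap_filter key xs k K hK]
    by_cases hk : k ∈ K
    · simp [hk]
    · rw [if_neg hk, List.filter_eq_nil_iff]
      intro x hx
      simp only [beq_iff_eq]
      intro h
      exact hk (h ▸ hcov x hx)

-- B's buckets: lookup is the in-order filter of chunks with that score.
theorem buckets_getD (key : String → Int) (chunks : List String) (s : Int) :
    (chunks.foldl (fun d c => d.modify (key c) [] (fun l => l ++ [c])) PySem.Dict.empty).getD s [] =
      chunks.filter (fun c => key c == s) := by
  have h := PySem.Dict.getD_foldl_modify_append (chunks.map (fun c => ((key c, c) : Int × String))) PySem.Dict.empty s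
  rw [List.foldl_map] at h
  rw [h, List.filter_map, List.map_map]
  simp [Function.comp_def]

-- B's buckets: the key list is the distinct scores in first-occurrence order.
theorem buckets_keys (key : String → Int) (chunks : List String) :
    (chunks.foldl (fun d c => d.modify (key c) [] (fun l => l ++ [c])) PySem.Dict.empty).keys =
      PySem.Set.ofList (chunks.map key) := by
  have h := PySem.Dict.keys_foldl_modify_key chunks key ([] : List String)
      (fun _ c => fun l => l ++ [c]) PySem.Dict.empty
  rw [h, PySem.Set.ofList_eq_foldl]
  simp [PySem.Set.update, PySem.Dict.keys, PySem.Dict.empty]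

-- the descending distinct score list is strictly descending.
theorem sorted_keys_desc (ks : List Int) :
    (PySem.List.sorted (PySem.Set.ofList ks) (fun s => s) true).Pairwise (· > ·) := by
  have h1 := PySem.List.sorted_pairwise_rev (PySem.Set.ofList ks) (fun s => s)
  have h2 : (PySem.List.sorted (PySem.Set.ofList ks) (fun s => s) true).Nodup :=
    (PySem.List.sorted_perm (PySem.Set.ofList ks) (fun s => s) true).nodup_iff.mpr
      (PySem.Set.nodup_ofList ks)
  exact (h1.and h2).imp (fun {a b} h => by obtain ⟨h1, h2⟩ := h; omega)

-- ===== VERDICT (by name: the statement is the Claim_ definition above) =====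
theorem prioritize_chunks_spec : Claim_equal_prioritize_chunks := by
  intro chunks user_query _
  unfold Spec_prioritize_chunks prioritize_chunks prioritize_chunks_alt
  dsimp only
  set qk := PySem.Set.ofList (PySem.Str.split₀ (PySem.Str.lower user_query)) with hqk
  set key := pvScore qk with hkey
  set K := PySem.List.sorted
      (chunks.foldl (fun d c => d.modify (key c) [] (fun l => l ++ [c])) PySem.Dict.empty).keys
      (fun s => s) true with hK
  have hKeys := buckets_keys key chunks
  have hKdesc : K.Pairwise (· > ·) := by rw [hK, hKeys]; exact sorted_keys_desc _
  have hcov : ∀ x ∈ chunks.map (fun c => (c, key c)), (fun x : String × Int => x.2) x ∈ K := by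
    intro x hx
    obtain ⟨c, hc, rfl⟩ := List.mem_map.mp hx
    rw [hK, PySem.List.mem_sorted, hKeys, PySem.Set.mem_ofList]
    exact List.mem_map.mpr ⟨c, hc, rfl⟩
  rw [foldl_append_pair_eq_map key chunks [], List.nil_append]
  rw [sorted_rev_eq_flatMap (fun x => x.2) (chunks.map (fun c => (c, key c))) K hKdesc hcov]
  rw [PySem.List.foldl_append_eq_flatMap, List.nil_append, List.map_flatMap]
  congr 1
  funext s
  rw [buckets_getD key chunks, List.filter_map]
  simp [Function.comp_def]
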